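-- pv_equiv track=rewrite | github.com/Milo-Coolman/Fantasy-Basketball-Optimizer | backend/analyzers/matchup_analyzer.py | _get_current_standing
-- ===== SOURCE A (Python) =====
-- from typing import Any, Dict, List, Optional, Tuple, Set
--
-- def _get_current_standing(
--
--     team_id: int,
--     standings: Dict[int, Tuple[int, int, int]],
--     all_team_ids: List[int]
-- ) -> int:
--     """Get current standing for a team based on record."""
--     sorted_teams = sorted(
--         all_team_ids,
--         key=lambda tid: (
--             standings.get(tid, (0, 0, 0))[0],  # Wins
--             -standings.get(tid, (0, 0, 0))[1],  # Losses
--             standings.get(tid, (0, 0, 0))[2]   # Ties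
--         ),
--         reverse=True
--     )
--
--     for rank, tid in enumerate(sorted_teams, 1):
--         if tid == team_id:
--             return rank
--
--     return len(all_team_ids)
-- ===== SOURCE B (Python) =====
-- def _get_current_standing(team_id, standings, all_team_ids):
--     """Rank = 1 + number of teams ranked above, in one pass (no sort)."""
--     try:
--         i = all_team_ids.index(team_id)
--     except ValueError:
--         return len(all_team_ids)
--     rec = standings.get(team_id, (0, 0, 0))
--     my_key = (rec[0], -rec[1], rec[2])
--     rank = 1
--     for j, tid in enumerate(all_team_ids):
--         r = standings.get(tid, (0, 0, 0))
--         k = (r[0], -r[1], r[2])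
--         if k > my_key or (k == my_key and j < i):
--             rank += 1
--     return rank
-- ===== Notes on version B (the rewrite author's own statement) =====
-- stated objective: faster
-- what changed: Replaces the sort-then-scan (sorted by (wins,-losses,ties) descending, then linear search for the team) by a single counting pass: rank = 1 + number of teams with a strictly better record plus equal-record teams appearing earlier in the list (stable-sort tie order).
import Mathlib
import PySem

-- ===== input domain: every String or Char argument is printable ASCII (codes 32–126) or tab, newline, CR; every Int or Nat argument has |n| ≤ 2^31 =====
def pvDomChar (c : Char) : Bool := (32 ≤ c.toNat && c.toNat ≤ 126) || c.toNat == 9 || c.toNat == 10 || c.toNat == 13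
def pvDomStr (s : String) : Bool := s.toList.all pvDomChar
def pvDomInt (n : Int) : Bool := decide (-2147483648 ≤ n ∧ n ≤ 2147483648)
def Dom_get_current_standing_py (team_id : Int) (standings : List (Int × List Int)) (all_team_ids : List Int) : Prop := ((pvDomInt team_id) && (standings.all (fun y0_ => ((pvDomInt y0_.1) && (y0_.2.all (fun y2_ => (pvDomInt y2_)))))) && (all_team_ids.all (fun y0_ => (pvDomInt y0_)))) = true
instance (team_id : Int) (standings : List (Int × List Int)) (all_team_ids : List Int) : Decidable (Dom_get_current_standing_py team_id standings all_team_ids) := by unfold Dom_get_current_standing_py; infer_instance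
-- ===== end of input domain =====

-- B replaces A's O(n log n) sort-then-scan by one O(n) counting pass (rank = 1 + teams ranked above, stable tie order); return value only, no mutation.

-- ===== PORT A =====
-- standings.get(tid, (0,0,0)): first-match association-list lookup with a default
def pvLookup (standings : List (Int × List Int)) (k : Int) : List Int :=
  ((standings.find? (fun p => p.1 == k)).map (·.2)).getD [0, 0, 0]

-- the sort key (wins, -losses, ties); tuple indexing v[0]/v[1]/v[2] is PySem.List.pyGet?
-- (under Pre_ the index is always in range, so the IndexError case .getD 0 is never taken)
def pvKey (standings : List (Int × List Int)) (tid : Int) : Int ×ₗ (Int ×ₗ Int) :=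
  toLex ((PySem.List.pyGet? (pvLookup standings tid) 0).getD 0,
    toLex (-((PySem.List.pyGet? (pvLookup standings tid) 1).getD 0),
           (PySem.List.pyGet? (pvLookup standings tid) 2).getD 0))

-- 'for rank, tid in enumerate(sorted_teams, 1): if tid == team_id: return rank'
def pvFindRank (team_id : Int) : List Int → Int → Option Int
  | [], _ => none
  | t :: ts, r => if t == team_id then some r else pvFindRank team_id ts (r + 1)

def get_current_standing_py (team_id : Int) (standings : List (Int × List Int)) (all_team_ids : List Int) : Int :=
  let sorted_teams := PySem.List.sorted all_team_ids (fun tid => pvKey standings tid) true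
  match pvFindRank team_id sorted_teams 1 with
  | some r => r
  | none => (all_team_ids.length : Int)

-- ===== PORT B =====
def get_current_standing_py_alt (team_id : Int) (standings : List (Int × List Int)) (all_team_ids : List Int) : Int :=
  match PySem.List.index? all_team_ids team_id with
  | none => (all_team_ids.length : Int)
  | some i =>
    let my_key := pvKey standings team_id
    (PySem.List.enumerate all_team_ids 0).foldl
      (fun rank p =>
        if my_key < pvKey standings p.2 ∨ (pvKey standings p.2 = my_key ∧ p.1 < (i : Int))
        then rank + 1 else rank) 1

-- ===== PRECONDITION & SPEC =====
-- Pre_ excludes exactly the inputs where Python A raises IndexError: some team in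
-- all_team_ids has a standings record with fewer than 3 entries (A indexes [0],[1],[2]).
def Pre_get_current_standing_py (team_id : Int) (standings : List (Int × List Int)) (all_team_ids : List Int) : Prop :=
  ∀ tid ∈ all_team_ids, ((standings.find? (fun p => p.1 == tid)).all (fun p => decide (3 ≤ p.2.length))) = true
instance (team_id : Int) (standings : List (Int × List Int)) (all_team_ids : List Int) : Decidable (Pre_get_current_standing_py team_id standings all_team_ids) := by unfold Pre_get_current_standing_py; infer_instance
def pvWitness_get_current_standing_py : Int × (List (Int × List Int)) × List Int := (1, [(1, [2, 0, 1])], [1, 2])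

def Spec_get_current_standing_py (team_id : Int) (standings : List (Int × List Int)) (all_team_ids : List Int) (out : Int) : Prop := out = get_current_standing_py_alt team_id standings all_team_ids
instance (team_id : Int) (standings : List (Int × List Int)) (all_team_ids : List Int) (out : Int) : Decidable (Spec_get_current_standing_py team_id standings all_team_ids out) := by unfold Spec_get_current_standing_py; infer_instance

-- ===== CLAIM (what is proved, stated in full; the proofs are below) =====
def Claim_equal_get_current_standing_py : Prop := ∀ (team_id : Int) (standings : List (Int × List Int)) (all_team_ids : List Int), Dom_get_current_standing_py team_id standings all_team_ids → Pre_get_current_standing_py team_id standings all_team_ids → Spec_get_current_standing_py team_id standings all_team_ids (get_current_standing_py team_id standings all_team_ids)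

-- ===== LEMMAS AND PROOFS =====

-- number of teams a stable descending sort by key f places strictly before the first
-- occurrence of v: strictly greater key, or equal key and listed earlier
def pvAbove {α κ : Type} [LinearOrder κ] [DecidableEq α] (f : α → κ) (v : α) (xs : List α) : Nat :=
  xs.countP (fun y => decide (f v < f y)) +
    (xs.takeWhile (fun y => decide (y ≠ v))).countP (fun y => decide (f y = f v))

theorem pv_countP_or_split {α : Type} (p q : α → Prop) [DecidablePred p] [DecidablePred q]
    (h : ∀ x, ¬ (p x ∧ q x)) (l : List α) :
    l.countP (fun x => decide (p x ∨ q x)) =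
      l.countP (fun x => decide (p x)) + l.countP (fun x => decide (q x)) := by
  induction l with
  | nil => simp
  | cons a t ih =>
    simp only [List.countP_cons, ih]
    by_cases hp : p a <;> by_cases hq : q a <;> simp [hp, hq] <;> first | omega | exact absurd ⟨hp, hq⟩ (h a)

-- where insertion into a stable descending insertion sort puts x, as seen by .index()
theorem pv_insert_index {α κ : Type} [LinearOrder κ] [DecidableEq α] [BEq α] [LawfulBEq α]
    (f : α → κ) (x v : α) (S : List α) (hS : S.Pairwise (fun a b => f b ≤ f a)) :
    PySem.List.index? (PySem.List.insertBy (fun a b => decide (f b < f a)) x S) v =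
      match PySem.List.index? S v with
      | some k => some (if f v < f x then k + 1 else k)
      | none => if v = x then some (S.countP (fun y => decide (f x ≤ f y))) else none := by
  induction S with
  | nil =>
    by_cases hvx : v = x
    · simp [PySem.List.insertBy, PySem.List.index?_eq_idxOf?, List.idxOf?, hvx]
    · simp only [PySem.List.insertBy, PySem.List.index?_eq_idxOf?, List.idxOf?]
      simp [hvx]
      exact fun h => hvx h.symm
  | cons y ys ih =>
    rw [List.pairwise_cons] at hS
    obtain ⟨hy, hrest⟩ := hS
    simp only [PySem.List.insertBy]
    by_cases hbx : f y < f x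
    · rw [if_pos (by simpa using hbx)]
      by_cases hvx : v = x
      · subst hvx
        rw [PySem.List.index?_cons_self]
        have hvnot : v ∉ y :: ys := by
          intro hmem
          have hle : f v ≤ f y := by
            rcases List.mem_cons.mp hmem with h | h
            · exact le_of_eq (congrArg f h)
            · exact hy v h
          exact absurd hbx (not_lt.mpr hle)
        rw [(PySem.List.index?_eq_none_iff _ _).mpr hvnot]
        have hcnt : (y :: ys).countP (fun z => decide (f v ≤ f z)) = 0 := by
          refine List.countP_eq_zero.mpr (fun z hz => ?_)
          have hle : f z ≤ f y := by
            rcases List.mem_cons.mp hz with h | h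
            · exact le_of_eq (congrArg f h)
            · exact hy z h
          simpa using not_le.mpr (lt_of_le_of_lt hle hbx)
        simp [hcnt]
      · rw [PySem.List.index?_cons_of_ne (y :: ys) (show x ≠ v from fun h => hvx h.symm)]
        cases hidx : PySem.List.index? (y :: ys) v with
        | none => simp [hvx]
        | some k =>
          have hvmem : v ∈ y :: ys := by
            rw [← PySem.List.index?_isSome_iff (y :: ys) v, hidx]; rfl
          have hfv : f v ≤ f y := by
            rcases List.mem_cons.mp hvmem with h | h
            · exact le_of_eq (congrArg f h)
            · exact hy v h
          simp [lt_of_le_of_lt hfv hbx]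
    · rw [if_neg (by simpa using hbx)]
      have hxy : f x ≤ f y := not_lt.mp hbx
      by_cases hvy : y = v
      · subst hvy
        rw [PySem.List.index?_cons_self, PySem.List.index?_cons_self]
        simp [not_lt.mpr hxy]
      · rw [PySem.List.index?_cons_of_ne _ hvy, PySem.List.index?_cons_of_ne _ hvy, ih hrest]
        cases hidx : PySem.List.index? ys v with
        | none =>
          by_cases hvx : v = x
          · simp [hvx, List.countP_cons, decide_eq_true hxy]
          · simp [hvx]
        | some k =>
          by_cases hlt : f v < f x <;> simp [hlt]

theorem pv_countP_le_split {α κ : Type} [LinearOrder κ] (f : α → κ) (v : α) (p : List α) :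
    p.countP (fun y => decide (f v ≤ f y)) =
      p.countP (fun y => decide (f v < f y)) + p.countP (fun y => decide (f y = f v)) := by
  rw [← pv_countP_or_split (fun y => f v < f y) (fun y => f y = f v)
    (fun y hy => absurd (hy.2 ▸ hy.1) (lt_irrefl _)) p]
  refine List.countP_congr (fun y _ => ?_)
  by_cases h : f v ≤ f y
  · simp only [decide_eq_true h, eq_comm (a := f y)]
    simp [le_iff_lt_or_eq.mp h]
  · have h1 : ¬ f v < f y := fun hh => h hh.le
    have h2 : ¬ f y = f v := fun hh => h (le_of_eq hh.symm)
    simp [h, h1, h2]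

theorem pv_takeWhile_ne_append_mem {α : Type} [DecidableEq α] (v x : α) (p : List α) (hv : v ∈ p) :
    (p ++ [x]).takeWhile (fun y => decide (y ≠ v)) = p.takeWhile (fun y => decide (y ≠ v)) := by
  rw [List.takeWhile_append, if_neg]
  intro hlen
  have heq : p.takeWhile (fun y => decide (y ≠ v)) = p :=
    (List.takeWhile_sublist _).eq_of_length hlen
  have := List.takeWhile_eq_self_iff.mp heq v hv
  simp at this

-- the first occurrence of v in the stable reverse-sorted list sits at index pvAbove f v xs
theorem pv_sorted_index {α κ : Type} [LinearOrder κ] [DecidableEq α] [BEq α] [LawfulBEq α]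
    (f : α → κ) (v : α) (xs : List α) :
    PySem.List.index? (PySem.List.sorted xs f true) v =
      if v ∈ xs then some (pvAbove f v xs) else none := by
  induction xs using List.reverseRecOn with
  | nil => simp [PySem.List.sorted_rev_eq_foldl_insertBy, PySem.List.index?_eq_idxOf?, List.idxOf?]
  | append_singleton p x ih =>
    have hstep : PySem.List.sorted (p ++ [x]) f true
        = PySem.List.insertBy (fun a b => decide (f b < f a)) x (PySem.List.sorted p f true) := by
      rw [PySem.List.sorted_rev_eq_foldl_insertBy (p ++ [x]) f, List.foldl_append]
      simp only [List.foldl_cons, List.foldl_nil]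
      rw [← PySem.List.sorted_rev_eq_foldl_insertBy p f]
    rw [hstep, pv_insert_index f x v _ (PySem.List.sorted_pairwise_rev p f), ih]
    by_cases hv : v ∈ p
    · have habove : pvAbove f v (p ++ [x]) = pvAbove f v p + (if f v < f x then 1 else 0) := by
        unfold pvAbove
        rw [List.countP_append, pv_takeWhile_ne_append_mem v x p hv, List.countP_singleton]
        by_cases h : f v < f x <;> simp [h] <;> omega
      simp only [if_pos hv, if_pos (List.mem_append_left [x] hv), habove]
      by_cases h : f v < f x <;> simp [h]
    · by_cases hvx : v = x
      · subst hvx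
        have hcnt : (PySem.List.sorted p f true).countP (fun y => decide (f v ≤ f y))
            = p.countP (fun y => decide (f v ≤ f y)) :=
          (PySem.List.sorted_perm p f true).countP_eq _
        have hall : p.takeWhile (fun y => decide (y ≠ v)) = p :=
          List.takeWhile_eq_self_iff.mpr (fun y hy => by
            simp only [decide_eq_true_eq]
            exact fun h => hv (h ▸ hy))
        have htw : (p ++ [v]).takeWhile (fun y => decide (y ≠ v)) = p := by
          rw [List.takeWhile_append, if_pos (by rw [hall])]
          simp
        have habove : pvAbove f v (p ++ [v]) = p.countP (fun y => decide (f v ≤ f y)) := by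
          unfold pvAbove
          rw [List.countP_append, htw, List.countP_singleton, pv_countP_le_split f v p]
          simp
        simp [hv, habove, hcnt]
      · simp [hv, hvx, fun h : v = x => hvx h]

theorem pv_findRank_eq (v : Int) (l : List Int) (r : Int) :
    pvFindRank v l r = (PySem.List.index? l v).map (fun k : Nat => r + (k : Int)) := by
  induction l generalizing r with
  | nil => simp [pvFindRank, PySem.List.index?_eq_idxOf?, List.idxOf?]
  | cons t ts ih =>
    by_cases h : t = v
    · subst h
      rw [PySem.List.index?_cons_self]
      simp [pvFindRank]
    · rw [PySem.List.index?_cons_of_ne ts h]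
      simp only [pvFindRank, beq_iff_eq, if_neg h, ih]
      cases PySem.List.index? ts v <;> simp <;> omega

theorem pv_enum_countP_lt {κ : Type} [LinearOrder κ] (f : Int → κ) (v : Int) (i : Nat)
    (l : List Int) (s : Int) (h : s + l.length ≤ (i : Int)) :
    (PySem.List.enumerate l s).countP
        (fun p => decide (f v < f p.2 ∨ (f p.2 = f v ∧ p.1 < (i : Int)))) =
      l.countP (fun y => decide (f v < f y ∨ f y = f v)) := by
  induction l generalizing s with
  | nil => simp [PySem.List.enumerate]
  | cons y ys ih =>
    rw [PySem.List.enumerate_cons, List.countP_cons, List.countP_cons,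
      ih (s + 1) (by simp only [List.length_cons] at h; push_cast at h ⊢; omega)]
    have hs : s < (i : Int) := by simp only [List.length_cons] at h; push_cast at h; omega
    by_cases h1 : f v < f y <;> by_cases h2 : f y = f v <;> simp [h1, h2, hs]

theorem pv_enum_countP_ge {κ : Type} [LinearOrder κ] (f : Int → κ) (v : Int) (i : Nat)
    (l : List Int) (s : Int) (h : (i : Int) ≤ s) :
    (PySem.List.enumerate l s).countP
        (fun p => decide (f v < f p.2 ∨ (f p.2 = f v ∧ p.1 < (i : Int)))) =
      l.countP (fun y => decide (f v < f y)) := by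
  induction l generalizing s with
  | nil => simp [PySem.List.enumerate]
  | cons y ys ih =>
    rw [PySem.List.enumerate_cons, List.countP_cons, List.countP_cons, ih (s + 1) (by omega)]
    have hs : ¬ s < (i : Int) := by omega
    by_cases h1 : f v < f y <;> simp [h1, hs]

-- B's enumerate-count equals the stable-sort position of v's first occurrence
theorem pv_above_eq_enum_count {κ : Type} [LinearOrder κ] (f : Int → κ) (v : Int) (i : Nat)
    (xs : List Int) (hidx : PySem.List.index? xs v = some i) :
    (PySem.List.enumerate xs 0).countP
        (fun p => decide (f v < f p.2 ∨ (f p.2 = f v ∧ p.1 < (i : Int)))) =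
      pvAbove f v xs := by
  obtain ⟨pre, suf, hxs, hlen, hnot⟩ := (PySem.List.index?_eq_some_iff xs v i).mp hidx
  subst hxs
  have hallpre : pre.takeWhile (fun y => decide (y ≠ v)) = pre :=
    List.takeWhile_eq_self_iff.mpr (fun y hy => by
      simp only [decide_eq_true_eq]
      exact fun h => hnot (h ▸ hy))
  have htw : (pre ++ v :: suf).takeWhile (fun y => decide (y ≠ v)) = pre := by
    rw [List.takeWhile_append, if_pos (by rw [hallpre])]
    simp
  rw [PySem.List.enumerate_append, List.countP_append,
    pv_enum_countP_lt f v i pre 0 (by omega),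
    pv_enum_countP_ge f v i (v :: suf) (0 + pre.length) (by omega),
    pv_countP_or_split (fun y => f v < f y) (fun y => f y = f v)
      (fun y hy => absurd (hy.2 ▸ hy.1) (lt_irrefl _)) pre]
  unfold pvAbove
  rw [htw, List.countP_append]
  omega

theorem pv_main (team_id : Int) (standings : List (Int × List Int)) (all_team_ids : List Int) :
    get_current_standing_py team_id standings all_team_ids
      = get_current_standing_py_alt team_id standings all_team_ids := by
  unfold get_current_standing_py get_current_standing_py_alt
  cases hidx : PySem.List.index? all_team_ids team_id with
  | none =>
    have hmem : team_id ∉ all_team_ids := (PySem.List.index?_eq_none_iff _ _).mp hidx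
    dsimp only
    rw [pv_findRank_eq, pv_sorted_index, if_neg hmem]
    rfl
  | some i =>
    have hmem : team_id ∈ all_team_ids := by
      rw [← PySem.List.index?_isSome_iff all_team_ids team_id, hidx]; rfl
    dsimp only
    rw [pv_findRank_eq, pv_sorted_index, if_pos hmem]
    dsimp only [Option.map]
    rw [PySem.List.foldl_ite_add_one
      (fun p => (pvKey standings team_id < pvKey standings p.2 ∨
        (pvKey standings p.2 = pvKey standings team_id ∧ p.1 < (i : Int))))
      (PySem.List.enumerate all_team_ids 0) 1]
    rw [pv_above_eq_enum_count (fun tid => pvKey standings tid) team_id i all_team_ids hidx]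

-- ===== VERDICT (by name: the statement is the Claim_ definition above) =====
theorem get_current_standing_py_spec : Claim_equal_get_current_standing_py := by
  intro team_id standings all_team_ids _ _
  unfold Spec_get_current_standing_py
  exact pv_main team_id standings all_team_ids
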